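-- pv_equiv track=rewrite | github.com/Narja144/others | Duodecimal Converter 3.py | get
-- ===== SOURCE A (Python) =====
-- def get(num,e):
--     a, x = 0, num
--     while x > 12**e-1:
--         x -= 12**e
--         a += 1
--         if a == 12:
--             a = 0
--             e = get(num,e+1)
--     if a >= 1:
--         return e+1
--     else:
--         return e
-- ===== SOURCE B (Python) =====
-- def get(num, e):
--     d = 0
--     n = num
--     while n > 0:
--         n //= 12
--         d += 1
--     return max(d, e)
-- ===== Notes on version B (the rewrite author's own statement) =====
-- stated objective: simpler
-- what changed: Replaces A's unit-by-unit subtraction loop with carry counter and recursive re-entry (recomputing get(num,e+1) at every carry) by a single divide-by-12 loop that counts the digits of num directly, returning max(digit_count, e).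
-- outside the precondition, e.g. on get(5, -1): A returns 1, B returns 1; on get(-13, -1): A returns -1, B returns 0
import Mathlib
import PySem

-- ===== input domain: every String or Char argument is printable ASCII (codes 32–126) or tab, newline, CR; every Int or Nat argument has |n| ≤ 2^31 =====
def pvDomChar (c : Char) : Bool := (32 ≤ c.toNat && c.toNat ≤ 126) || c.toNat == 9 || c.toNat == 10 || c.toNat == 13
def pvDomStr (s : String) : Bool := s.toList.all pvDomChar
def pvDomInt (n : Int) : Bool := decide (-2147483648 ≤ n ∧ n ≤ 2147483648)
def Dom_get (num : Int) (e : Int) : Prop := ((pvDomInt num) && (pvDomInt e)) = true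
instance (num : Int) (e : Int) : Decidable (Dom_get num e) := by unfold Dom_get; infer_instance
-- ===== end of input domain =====

-- B replaces A's subtract-12^e-with-carry-and-recursion loop by a direct divide-by-12
-- digit count followed by max with e (objective: simpler).

-- ===== PORT A =====
-- digit count in base 12 (dcN n = number of base-12 digits of n, dcN 0 = 0);
-- used by port A only to size the fuel of its totalized while-loop, and by port B as its count loop.
def dcN : Nat → Nat
  | 0 => 0
  | n + 1 => dcN ((n + 1) / 12) + 1
decreasing_by exact Nat.div_lt_self (Nat.succ_pos _) (by omega)

-- A's while-loop + recursion, fuel-totalized step for step: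
-- state (a, x, e); guard `x > 12**e - 1`; body `x -= 12**e; a += 1; if a == 12: a = 0; e = get(num, e+1)`;
-- after the loop `return e+1 if a >= 1 else e`.  `12**e` is ported as 12^e.toNat (exact for e ≥ 0 = Pre_get;
-- for e < 0 Python computes with floats, excluded by Pre_get).
def runA : Nat → Int → Nat → Int → Int → Int
  | 0, _, _, _, e => e
  | f + 1, num, a, x, e =>
    if x > 12 ^ e.toNat - 1 then
      if a + 1 = 12 then runA f num 0 (x - 12 ^ e.toNat) (runA f num 0 num (e + 1))
      else runA f num (a + 1) (x - 12 ^ e.toNat) e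
    else if 1 ≤ a then e + 1 else e

-- fuel 12*(digit count)+25 is proved sufficient in the lemmas below
def get (num : Int) (e : Int) : Int := runA (12 * dcN num.toNat + 25) num 0 num e

-- ===== PORT B =====
-- Source B: d = 0; n = num; while n > 0: n //= 12; d += 1; return max(d, e)
-- the count loop is dcN on num.toNat (exact: the loop only runs while n > 0, and Python's // on
-- positive operands is Nat division; for num ≤ 0 the loop body never runs and dcN 0 = 0).
def get_alt (num : Int) (e : Int) : Int := max ((dcN num.toNat : Int)) e

-- ===== PRECONDITION & SPEC =====
-- Pre_get excludes e < 0: there Python's 12**e is a float and A's whole loop runs on float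
-- arithmetic, which has no exact Int port (A still returns there, e.g. A (-13) (-1) = -1 while B gives 0).
def Pre_get (num : Int) (e : Int) : Prop := 0 ≤ e
instance (num : Int) (e : Int) : Decidable (Pre_get num e) := by unfold Pre_get; infer_instance
def pvWitness_get : Int × Int := (157, 1)

def Spec_get (num : Int) (e : Int) (out : Int) : Prop := out = get_alt num e
instance (num : Int) (e : Int) (out : Int) : Decidable (Spec_get num e out) := by unfold Spec_get; infer_instance

-- ===== CLAIM (what is proved, stated in full; the proofs are below) =====
def Claim_equal_get : Prop := ∀ (num : Int) (e : Int), Dom_get num e → Pre_get num e → Spec_get num e (get num e)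

-- ===== LEMMAS AND PROOFS =====

theorem dcN_le_iff (n : Nat) : ∀ m : Nat, dcN n ≤ m ↔ n < 12 ^ m := by
  induction n using Nat.strong_induction_on with
  | _ n ih =>
    intro m
    match n, m with
    | 0, m =>
      simp [dcN]
    | n + 1, 0 =>
      simp [dcN]
    | n + 1, m + 1 =>
      rw [dcN, Nat.succ_le_succ_iff,
        ih ((n + 1) / 12) (Nat.div_lt_self (Nat.succ_pos _) (by omega)) m,
        Nat.div_lt_iff_lt_mul (by omega), pow_succ]

theorem dcN_self_lt (n : Nat) : n < 12 ^ dcN n := by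
  exact (dcN_le_iff n (dcN n)).1 le_rfl

-- the loop when no carry to 12 can happen: it exits with a incremented iff x ≥ 12^e
theorem loop_small (fuel : Nat) : ∀ (num x e : Int) (a : Nat), a < 12 →
    x < ((12 : Int) - a) * 12 ^ e.toNat → 12 - a ≤ fuel →
    runA fuel num a x e = if (12 : Int) ^ e.toNat ≤ x then e + 1 else if 1 ≤ a then e + 1 else e := by
  induction fuel with
  | zero => intro _ _ _ a _ _ hf; omega
  | succ f ih =>
    intro num x e a ha hx hf
    have hP : (0 : Int) < 12 ^ e.toNat := pow_pos (by norm_num) _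
    rw [runA]
    by_cases hg : x > 12 ^ e.toNat - 1
    · have hx' : (12 : Int) ^ e.toNat ≤ x := by omega
      have ha' : a < 11 := by
        by_contra hc
        have : a = 11 := by omega
        subst this
        have : ((12 : Int) - 11) * 12 ^ e.toNat = 12 ^ e.toNat := by ring
        omega
      have hne : ¬ (a + 1 = 12) := by omega
      rw [if_pos hg, if_neg hne, ih num (x - 12 ^ e.toNat) e (a + 1) (by omega)
        (by push_cast; nlinarith) (by omega)]
      split_ifs with h1 h2 <;> omega
    · rw [if_neg hg]
      have : ¬ (12 : Int) ^ e.toNat ≤ x := by omega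
      rw [if_neg this]

-- running m more iterations while the guard certainly holds, from a = 12 - m down to the carry
theorem loop_full (m : Nat) : ∀ (fuel : Nat) (num x e : Int), 1 ≤ m → m ≤ 12 →
    (m : Int) * 12 ^ e.toNat ≤ x →
    runA (fuel + m) num (12 - m) x e
      = runA fuel num 0 (x - m * 12 ^ e.toNat) (runA fuel num 0 num (e + 1)) := by
  induction m with
  | zero => intro _ _ _ _ h1 _ _; omega
  | succ m ih =>
    intro fuel num x e h1 h12 hx
    have hP : (0 : Int) < 12 ^ e.toNat := pow_pos (by norm_num) _
    have hg : x > 12 ^ e.toNat - 1 := by push_cast at hx; nlinarith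
    by_cases hm : m = 0
    · subst hm
      show runA (fuel + 1) num (12 - 1) x e = _
      rw [runA, if_pos hg]
      norm_num
    · have : fuel + (m + 1) = (fuel + m) + 1 := by omega
      rw [this, runA, if_pos hg]
      have hne : ¬ ((12 - (m + 1)) + 1 = 12) := by omega
      rw [if_neg hne]
      have h1211 : 12 - (m + 1) + 1 = 12 - m := by omega
      rw [h1211, ih fuel num (x - 12 ^ e.toNat) e (by omega) (by omega)
        (by push_cast at hx ⊢; nlinarith)]
      congr 1
      push_cast
      ring

-- cast bridge: num.toNat < 12^m ↔ num < 12^m over Int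
theorem toNat_lt_pow (num : Int) (m : Nat) : num.toNat < 12 ^ m ↔ num < ((12 : Int)) ^ m := by
  have h : (0 : Nat) < 12 ^ m := pow_pos (by norm_num) m
  have hc : ((12 : Int)) ^ m = ((12 ^ m : Nat) : Int) := by push_cast; ring
  rw [hc]
  omega

theorem main_lemma (k : Nat) : ∀ (fuel : Nat) (num e : Int), 0 ≤ e →
    (dcN num.toNat : Int) ≤ e + k → 12 * k + 13 ≤ fuel →
    runA fuel num 0 num e = max ((dcN num.toNat : Int)) e := by
  induction k with
  | zero =>
    intro fuel num e he hD hf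
    have hlt : num < (12 : Int) ^ e.toNat := by
      rw [← toNat_lt_pow, ← dcN_le_iff]
      omega
    have hP : (0 : Int) < 12 ^ e.toNat := pow_pos (by norm_num) _
    rw [loop_small fuel num num e 0 (by omega) (by push_cast; nlinarith) (by omega)]
    have : ¬ (12 : Int) ^ e.toNat ≤ num := by omega
    rw [if_neg this]
    omega
  | succ k ih =>
    intro fuel num e he hD hf
    by_cases hk : (dcN num.toNat : Int) ≤ e + k
    · exact ih fuel num e he hk (by omega)
    have hDval : (dcN num.toNat : Int) = e + k + 1 := by push_cast at hD hk ⊢; omega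
    have hP : (0 : Int) < 12 ^ e.toNat := pow_pos (by norm_num) _
    have he1 : (e + 1).toNat = e.toNat + 1 := by omega
    by_cases hbig : (12 : Int) * 12 ^ e.toNat ≤ num
    · -- a full carry round happens: 12 iterations then recursion at e+1
      have hD2 : e + 2 ≤ (dcN num.toNat : Int) := by
        have h12 : ((12 : Int)) ^ (e.toNat + 1) ≤ num := by rw [pow_succ]; nlinarith
        by_contra hc
        have : dcN num.toNat ≤ e.toNat + 1 := by omega
        have := (dcN_le_iff num.toNat (e.toNat + 1)).1 this
        rw [toNat_lt_pow] at this
        omega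
      obtain ⟨f, rfl⟩ : ∃ f, fuel = f + 12 := ⟨fuel - 12, by omega⟩
      have h0 : (0 : Nat) = 12 - 12 := by omega
      rw [show runA (f + 12) num 0 num e = runA (f + 12) num (12 - 12) num e by rw [← h0]]
      rw [loop_full 12 f num num e (by omega) (by omega) (by push_cast; nlinarith)]
      rw [ih f num (e + 1) (by omega) (by omega) (by omega)]
      have hmax : max ((dcN num.toNat : Int)) (e + 1) = (dcN num.toNat : Int) := by omega
      rw [hmax]
      -- the remaining x = num - 12*12^e is below 12^(dcN num.toNat), so the loop exits with a = 0
      have hDnn : (0 : Int) ≤ (dcN num.toNat : Int) := by positivity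
      have htn : ((dcN num.toNat : Int)).toNat = dcN num.toNat := by omega
      have hxlt : num - 12 * 12 ^ e.toNat < (12 : Int) ^ ((dcN num.toNat : Int)).toNat := by
        rw [htn]
        have h1 := dcN_self_lt num.toNat
        rw [toNat_lt_pow] at h1
        have hnum : num ≤ (num.toNat : Int) := by omega
        omega
      have hPD : (0 : Int) < 12 ^ ((dcN num.toNat : Int)).toNat := pow_pos (by norm_num) _
      push_cast
      rw [loop_small f num (num - 12 * 12 ^ e.toNat) ((dcN num.toNat : Int)) 0 (by omega)
        (by push_cast; nlinarith) (by omega)]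
      rw [if_neg (by omega)]
      omega
    · -- num < 12^(e+1): the loop exits before a reaches 12
      rw [loop_small fuel num num e 0 (by omega) (by push_cast; nlinarith) (by omega)]
      have hge : (12 : Int) ^ e.toNat ≤ num := by
        by_contra hc
        have : num.toNat < 12 ^ e.toNat := by rw [toNat_lt_pow]; omega
        have := (dcN_le_iff num.toNat e.toNat).2 this
        omega
      rw [if_pos hge]
      have : dcN num.toNat ≤ e.toNat + 1 := by
        rw [dcN_le_iff, toNat_lt_pow, pow_succ]
        nlinarith
      omega

-- ===== VERDICT (by name: the statement is the Claim_ definition above) =====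
theorem get_spec : Claim_equal_get := by
  intro num e _ hpre
  unfold Spec_get _root_.get get_alt
  exact main_lemma (dcN num.toNat) (12 * dcN num.toNat + 25) num e hpre
    (by have : (0:Int) ≤ e := hpre; omega) (by omega)
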